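-- pv_equiv track=rewrite | github.com/Trinath12/Nine-men-s-morris | ABOpeningImproved.py | nbloW
-- ===== SOURCE A (Python) =====
-- def neighbours(j):
--
--     if (j==0):
--         arr=[1,2,15]
--         return arr
--     if (j==1):
--         arr=[0,3,8]
--         return arr
--     if (j==2):
--         arr=[0,4,3,12]
--         return arr
--     if (j==3):
--         arr=[1,5,2,7]
--         return arr
--     if (j==4):
--        arr=[2,9,5]
--        return arr
--     if (j==5):
--        arr=[3,4,6]
--        return arr
--     if (j==6):
--         arr=[11,7,5]
--         return arr
--     if (j==7):
--         arr=[6,8,3,14]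
--         return arr
--     if (j==8):
--         arr=[1,7,17]
--         return arr
--     if (j==9):
--         arr=[4,10,12]
--         return arr
--     if (j==10):
--         arr=[9,13,11]
--         return arr
--     if (j==11):
--         arr=[6,10,14]
--         return arr
--     if (j==12):
--         arr=[9,13,15,2]
--         return arr
--     if (j==13):
--         arr=[12,14,10,16]
--         return arr
--     if (j==14):
--         arr=[11,17,7,13]
--         return arr
--     if (j==15):
--         arr=[0,12,16]
--         return arr
--     if (j==16):
--         arr=[13,15,17]
--         return arr
--     if (j==17):
--         arr=[8,14,16]
--         return arr
--     else:
--         return None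
--
-- def nbloW(b):
--     cnt=0
--     s=0
--     nwp=b.count('W')
--     if (nwp>3):
--         for i in range(0,len(b)):
--             if (b[i]=='W'):
--                 n=neighbours(i)
--                 for j in n:
--                     if (b[j]=='x'):
--                         s+=1
--                 if(s==0):
--                     cnt+=1
--                 s=0
--     return cnt
-- ===== SOURCE B (Python) =====
-- # Edge-list formulation: the 18-cell mill board as 30 undirected edges.
-- EDGES = [(0, 1), (0, 2), (0, 15), (1, 3), (1, 8), (2, 3), (2, 4), (2, 12),
--          (3, 5), (3, 7), (4, 5), (4, 9), (5, 6), (6, 7), (6, 11), (7, 8),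
--          (7, 14), (8, 17), (9, 10), (9, 12), (10, 11), (10, 13), (11, 14),
--          (12, 13), (12, 15), (13, 14), (13, 16), (14, 17), (15, 16), (16, 17)]
--
--
-- def nbloW(b):
--     # Sweep the edge list once: a white endpoint of an edge whose other
--     # endpoint is empty is "mobile"; the answer is #whites - #mobile whites.
--     if b.count('W') <= 3:
--         return 0
--     mobile = set()
--     for u, v in EDGES:
--         if b[u] == 'x' and b[v] == 'W':
--             mobile.add(v)
--         if b[v] == 'x' and b[u] == 'W':
--             mobile.add(u)
--     return b.count('W') - len(mobile)
-- ===== Notes on version B (the rewrite author's own statement) =====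
-- stated objective: alternative
-- what changed: B replaces A's per-white-piece scan of a per-cell neighbour table by a single sweep over a fixed undirected edge list of the board that collects the whites adjacent to an empty cell into a set, then returns #whites minus the size of that set (exact because each table entry is one orientation of one edge).
-- outside the precondition, e.g. on nbloW('WWWWooooooooooooo'): A returns 4, B raises IndexError; on nbloW('WWWoooooooooooooooW'): A raises TypeError, B returns 4
import Mathlib
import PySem

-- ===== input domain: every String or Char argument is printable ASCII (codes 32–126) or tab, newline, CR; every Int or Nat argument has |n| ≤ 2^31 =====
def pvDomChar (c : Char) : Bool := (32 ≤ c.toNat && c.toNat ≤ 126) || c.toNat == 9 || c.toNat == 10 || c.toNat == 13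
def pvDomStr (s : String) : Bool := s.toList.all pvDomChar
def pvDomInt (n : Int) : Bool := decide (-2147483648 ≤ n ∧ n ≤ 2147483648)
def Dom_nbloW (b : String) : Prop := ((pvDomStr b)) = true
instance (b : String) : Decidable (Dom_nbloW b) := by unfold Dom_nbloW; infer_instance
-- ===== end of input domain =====

-- B replaces A's per-white-piece scan of a per-cell neighbour table by one sweep over a fixed
-- undirected EDGE LIST that collects the mobile whites into a set and subtracts (objective: alternative).

-- ===== PORT A =====
-- helper `neighbours` of the Python module (used by A only)
def neighboursFn (j : Int) : Option (List Int) :=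
  if j = 0 then some [1, 2, 15]
  else if j = 1 then some [0, 3, 8]
  else if j = 2 then some [0, 4, 3, 12]
  else if j = 3 then some [1, 5, 2, 7]
  else if j = 4 then some [2, 9, 5]
  else if j = 5 then some [3, 4, 6]
  else if j = 6 then some [11, 7, 5]
  else if j = 7 then some [6, 8, 3, 14]
  else if j = 8 then some [1, 7, 17]
  else if j = 9 then some [4, 10, 12]
  else if j = 10 then some [9, 13, 11]
  else if j = 11 then some [6, 10, 14]
  else if j = 12 then some [9, 13, 15, 2]
  else if j = 13 then some [12, 14, 10, 16]
  else if j = 14 then some [11, 17, 7, 13]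
  else if j = 15 then some [0, 12, 16]
  else if j = 16 then some [13, 15, 17]
  else if j = 17 then some [8, 14, 16]
  else none

-- literal port of A: state (cnt, s); b[i] / b[j] are pyGetD (in range on Pre_); a `None`
-- from neighbours is read as [] (Python would raise there — outside Pre_)
def nbloW (b : String) : Int :=
  let l := b.toList
  let nwp := PySem.Str.count b "W"
  if 3 < nwp then
    ((PySem.List.pyRange 0 (l.length : Int) 1).foldl (fun (st : Int × Int) i =>
      if PySem.List.pyGetD l i ' ' = 'W' then
        let n := (neighboursFn i).getD []
        let s := n.foldl (fun s j => if PySem.List.pyGetD l j ' ' = 'x' then s + 1 else s) st.2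
        (if s = 0 then st.1 + 1 else st.1, 0)
      else st) ((0 : Int), (0 : Int))).1
  else 0

-- ===== PORT B =====
-- B's module constant: the board as 30 undirected edges
def pvEdges : List (Int × Int) :=
  [(0, 1), (0, 2), (0, 15), (1, 3), (1, 8), (2, 3), (2, 4), (2, 12),
   (3, 5), (3, 7), (4, 5), (4, 9), (5, 6), (6, 7), (6, 11), (7, 8),
   (7, 14), (8, 17), (9, 10), (9, 12), (10, 11), (10, 13), (11, 14),
   (12, 13), (12, 15), (13, 14), (13, 16), (14, 17), (15, 16), (16, 17)]

-- literal port of B: edge sweep into a set `mobile`, then a subtraction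
def nbloW_alt (b : String) : Int :=
  if PySem.Str.count b "W" ≤ 3 then 0
  else
    let l := b.toList
    let mobile : PySem.Set Int := pvEdges.foldl (fun m uv =>
      let m1 := if PySem.List.pyGetD l uv.1 ' ' = 'x' ∧ PySem.List.pyGetD l uv.2 ' ' = 'W'
                then PySem.Set.add m uv.2 else m
      if PySem.List.pyGetD l uv.2 ' ' = 'x' ∧ PySem.List.pyGetD l uv.1 ' ' = 'W'
      then PySem.Set.add m1 uv.1 else m1) PySem.Set.empty
    (PySem.Str.count b "W" : Int) - (PySem.Set.len mobile : Int)

-- ===== PRECONDITION & SPEC =====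
-- Pre_ excludes non-standard boards (length ≠ 18) carrying more than three 'W's: there the two
-- programs' fixed 18-cell indexing runs off the board on different inputs (A through the neighbour
-- table of its white cells, B through its edge list) and each can raise where the other returns.
def Pre_nbloW (b : String) : Prop :=
  PySem.Str.count b "W" ≤ 3 ∨ b.toList.length = 18
instance (b : String) : Decidable (Pre_nbloW b) := by unfold Pre_nbloW; infer_instance

def pvWitness_nbloW : String := "WWWWxoxoBBoxooxoWo"

def Spec_nbloW (b : String) (out : Int) : Prop := out = nbloW_alt b
instance (b : String) (out : Int) : Decidable (Spec_nbloW b out) := by unfold Spec_nbloW; infer_instance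

-- ===== CLAIM (what is proved, stated in full; the proofs are below) =====
def Claim_equal_nbloW : Prop := ∀ (b : String), Dom_nbloW b → Pre_nbloW b → Spec_nbloW b (nbloW b)

-- ===== LEMMAS AND PROOFS =====

-- the predicate A's loop counts: a white cell with no empty neighbour (via the table)
def aok (l : List Char) (i : Int) : Bool :=
  decide (PySem.List.pyGetD l i ' ' = 'W' ∧
    ((neighboursFn i).getD []).countP (fun j => decide (PySem.List.pyGetD l j ' ' = 'x')) = 0)

-- the predicate B's set collects: a white cell with some empty neighbour (via an edge)
def edgeX (l : List Char) (y : Int) : Bool :=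
  pvEdges.any (fun uv =>
    (decide (y = uv.2) && decide (PySem.List.pyGetD l uv.1 ' ' = 'x')) ||
    (decide (y = uv.1) && decide (PySem.List.pyGetD l uv.2 ' ' = 'x')))

def mobp (l : List Char) (y : Int) : Bool :=
  decide (PySem.List.pyGetD l y ' ' = 'W') && edgeX l y

-- table entries lie in [0, 18); table membership is edge membership (either orientation)
lemma nbrs_range (i : Fin 18) : ∀ j ∈ (neighboursFn (i : Int)).getD [], 0 ≤ j ∧ j < 18 := by
  revert i; decide

lemma nbrs_edges (i j : Fin 18) :
    ((j : Int) ∈ (neighboursFn (i : Int)).getD []) ↔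
    (((j : Int), (i : Int)) ∈ pvEdges ∨ ((i : Int), (j : Int)) ∈ pvEdges) := by
  revert i j; decide

lemma edges_range : ∀ uv ∈ pvEdges, (0 ≤ uv.1 ∧ uv.1 < 18) ∧ (0 ≤ uv.2 ∧ uv.2 < 18) := by
  decide

-- A's fold counts `aok`
lemma aloop (l : List Char) (xs : List Int) : ∀ cnt : Int,
    xs.foldl (fun (st : Int × Int) i =>
      if PySem.List.pyGetD l i ' ' = 'W' then
        (if ((neighboursFn i).getD []).foldl
              (fun s j => if PySem.List.pyGetD l j ' ' = 'x' then s + 1 else s) st.2 = 0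
          then st.1 + 1 else st.1, 0)
      else st) (cnt, 0)
    = (cnt + (xs.countP (aok l) : Int), 0) := by
  induction xs with
  | nil => intro cnt; simp
  | cons x t ih =>
    intro cnt
    rw [List.foldl_cons]
    by_cases hw : PySem.List.pyGetD l x ' ' = 'W'
    · rw [if_pos hw, PySem.List.foldl_ite_add_one]
      by_cases hz : ((neighboursFn x).getD []).countP (fun j => decide (PySem.List.pyGetD l j ' ' = 'x')) = 0
      · rw [if_pos (by rw [hz]; simp), ih, List.countP_cons]
        have ha : aok l x = true := by simp [aok, hw, hz]
        rw [ha]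
        simp only [Prod.mk.injEq, if_true]
        constructor
        · push_cast; ring
        · trivial
      · rw [if_neg (by intro h; apply hz; omega), ih, List.countP_cons]
        have ha : aok l x = false := by simp [aok, hz]
        rw [ha]
        simp
    · rw [if_neg hw, ih, List.countP_cons]
      have ha : aok l x = false := by simp [aok, hw]
      rw [ha]
      simp

-- Python's s.count('W') is the character count
lemma countgoW (cs : List Char) : ∀ (fuel acc : Nat), cs.length ≤ fuel →
    PySem.Chars.count.go ['W'] fuel cs acc = acc + cs.count 'W' := by
  induction cs with
  | nil => intro fuel acc _; cases fuel <;> simp [PySem.Chars.count.go]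
  | cons c t ih =>
    intro fuel acc h
    cases fuel with
    | zero => simp at h
    | succ f =>
      have hstep : PySem.Chars.count.go ['W'] (f + 1) (c :: t) acc
          = if (['W'] : List Char).isPrefixOf (c :: t) then
              PySem.Chars.count.go ['W'] f (List.drop 1 (c :: t)) (acc + 1)
            else PySem.Chars.count.go ['W'] f t acc := rfl
      rw [hstep]
      simp only [List.isPrefixOf, List.drop_one, List.tail_cons, Bool.and_true]
      by_cases hc : c = 'W'
      · rw [if_pos (by simp [hc]), ih f (acc + 1) (by simpa using h)]
        simp [hc]; omega
      · rw [if_neg (by simp [Ne.symm hc]), ih f acc (by simpa using h)]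
        simp [hc]

lemma countW (cs : List Char) : PySem.Chars.count cs ['W'] = cs.count 'W' := by
  simp [PySem.Chars.count, countgoW cs cs.length 0 le_rfl]

-- membership in B's fold
lemma mob_step (l : List Char) (e : Int × Int) (m : List Int) (y : Int) :
    (y ∈ (let m1 := if PySem.List.pyGetD l e.1 ' ' = 'x' ∧ PySem.List.pyGetD l e.2 ' ' = 'W'
                    then PySem.Set.add m e.2 else m;
           if PySem.List.pyGetD l e.2 ' ' = 'x' ∧ PySem.List.pyGetD l e.1 ' ' = 'W'
           then PySem.Set.add m1 e.1 else m1))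
    ↔ y ∈ m ∨
        (PySem.List.pyGetD l e.1 ' ' = 'x' ∧ PySem.List.pyGetD l e.2 ' ' = 'W' ∧ y = e.2) ∨
        (PySem.List.pyGetD l e.2 ' ' = 'x' ∧ PySem.List.pyGetD l e.1 ' ' = 'W' ∧ y = e.1) := by
  by_cases h1 : PySem.List.pyGetD l e.1 ' ' = 'x' ∧ PySem.List.pyGetD l e.2 ' ' = 'W' <;>
    by_cases h2 : PySem.List.pyGetD l e.2 ' ' = 'x' ∧ PySem.List.pyGetD l e.1 ' ' = 'W' <;>
    simp [h1, h2, PySem.Set.mem_add] <;> tauto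

lemma mob_mem (l : List Char) (es : List (Int × Int)) : ∀ (m : List Int) (y : Int),
    (y ∈ es.foldl (fun m uv =>
      let m1 := if PySem.List.pyGetD l uv.1 ' ' = 'x' ∧ PySem.List.pyGetD l uv.2 ' ' = 'W'
                then PySem.Set.add m uv.2 else m
      if PySem.List.pyGetD l uv.2 ' ' = 'x' ∧ PySem.List.pyGetD l uv.1 ' ' = 'W'
      then PySem.Set.add m1 uv.1 else m1) m)
    ↔ y ∈ m ∨ ∃ uv ∈ es,
        (PySem.List.pyGetD l uv.1 ' ' = 'x' ∧ PySem.List.pyGetD l uv.2 ' ' = 'W' ∧ y = uv.2) ∨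
        (PySem.List.pyGetD l uv.2 ' ' = 'x' ∧ PySem.List.pyGetD l uv.1 ' ' = 'W' ∧ y = uv.1) := by
  induction es with
  | nil => intro m y; simp
  | cons e t ih =>
    intro m y
    rw [List.foldl_cons, ih, mob_step l e m y]
    constructor
    · rintro ((h | h) | ⟨uv, huv, hc⟩)
      · exact Or.inl h
      · exact Or.inr ⟨e, List.mem_cons_self .., h⟩
      · exact Or.inr ⟨uv, List.mem_cons_of_mem _ huv, hc⟩
    · rintro (h | ⟨uv, huv, hc⟩)
      · exact Or.inl (Or.inl h)
      · rcases List.mem_cons.mp huv with rfl | huv'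
        · exact Or.inl (Or.inr hc)
        · exact Or.inr ⟨uv, huv', hc⟩

lemma mob_nodup (l : List Char) (es : List (Int × Int)) : ∀ (m : List Int), m.Nodup →
    (es.foldl (fun m uv =>
      let m1 := if PySem.List.pyGetD l uv.1 ' ' = 'x' ∧ PySem.List.pyGetD l uv.2 ' ' = 'W'
                then PySem.Set.add m uv.2 else m
      if PySem.List.pyGetD l uv.2 ' ' = 'x' ∧ PySem.List.pyGetD l uv.1 ' ' = 'W'
      then PySem.Set.add m1 uv.1 else m1) m).Nodup := by
  induction es with
  | nil => intro m hm; exact hm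
  | cons e t ih =>
    intro m hm
    rw [List.foldl_cons]
    apply ih
    split_ifs
    · exact PySem.Set.nodup_add _ _ (PySem.Set.nodup_add _ _ hm)
    · exact PySem.Set.nodup_add _ _ hm
    · exact PySem.Set.nodup_add _ _ hm
    · exact hm

-- counting a conjunction splits over the second conjunct
lemma countP_split (l : List Int) (p q : Int → Bool) :
    l.countP p = l.countP (fun a => p a && q a) + l.countP (fun a => p a && !q a) := by
  induction l with
  | nil => simp
  | cons x t ih =>
    simp only [List.countP_cons, ih]
    cases hp : p x <;> cases hq : q x <;> simp [hp, hq] <;> omega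

-- "no empty table-neighbour" is "no empty edge-neighbour" on the board
lemma noX_iff_not_edgeX (l : List Char) (i : Int) (hi0 : 0 ≤ i) (hi : i < 18) :
    (((neighboursFn i).getD []).countP (fun j => decide (PySem.List.pyGetD l j ' ' = 'x')) = 0)
    ↔ edgeX l i = false := by
  have hii : ((⟨i.toNat, by omega⟩ : Fin 18) : Int) = i := by
    simp [Int.toNat_of_nonneg hi0]
  rw [List.countP_eq_zero]
  unfold edgeX
  rw [Bool.eq_false_iff, Ne, List.any_eq_true]
  simp only [Bool.or_eq_true, Bool.and_eq_true, decide_eq_true_eq, not_exists, not_or, not_and]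
  constructor
  · intro h uv huv
    constructor
    · intro heq hx
      obtain ⟨⟨hu0, hu18⟩, _⟩ := edges_range uv huv
      have huu : ((⟨uv.1.toNat, by omega⟩ : Fin 18) : Int) = uv.1 := by
        simp [Int.toNat_of_nonneg hu0]
      have hmem := (nbrs_edges ⟨i.toNat, by omega⟩ ⟨uv.1.toNat, by omega⟩).mpr
      rw [hii, huu] at hmem
      have hedge : (uv.1, i) ∈ pvEdges := by rw [heq]; simpa using huv
      exact absurd (by simpa using hx) (by simpa using h uv.1 (hmem (Or.inl hedge)))
    · intro heq hx
      obtain ⟨_, hv0, hv18⟩ := edges_range uv huv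
      have hvv : ((⟨uv.2.toNat, by omega⟩ : Fin 18) : Int) = uv.2 := by
        simp [Int.toNat_of_nonneg hv0]
      have hmem := (nbrs_edges ⟨i.toNat, by omega⟩ ⟨uv.2.toNat, by omega⟩).mpr
      rw [hii, hvv] at hmem
      have hedge : (i, uv.2) ∈ pvEdges := by rw [heq]; simpa using huv
      exact absurd (by simpa using hx) (by simpa using h uv.2 (hmem (Or.inr hedge)))
  · intro h j hj hx
    obtain ⟨hj0, hj18⟩ := nbrs_range ⟨i.toNat, by omega⟩ j (by rwa [hii])
    have hjj : ((⟨j.toNat, by omega⟩ : Fin 18) : Int) = j := by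
      simp [Int.toNat_of_nonneg hj0]
    have hmem := (nbrs_edges ⟨i.toNat, by omega⟩ ⟨j.toNat, by omega⟩).mp
    rw [hii, hjj] at hmem
    rcases hmem hj with he | he
    · exact (h (j, i) he).1 rfl hx
    · exact (h (i, j) he).2 rfl hx

-- ===== VERDICT (by name: the statement is the Claim_ definition above) =====
theorem nbloW_spec : Claim_equal_nbloW := by
  intro b _ hpre
  unfold Pre_nbloW at hpre
  unfold Spec_nbloW
  by_cases hc : PySem.Str.count b "W" ≤ 3
  · have hc2 : PySem.Chars.count b.toList ['W'] ≤ 3 := by simpa using hc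
    simp [nbloW, nbloW_alt, hc2, Nat.not_lt.mpr hc2]
  · have hlen : b.toList.length = 18 := hpre.resolve_left hc
    have h3 : 3 < PySem.Str.count b "W" := Nat.lt_of_not_le hc
    simp only [nbloW, nbloW_alt]
    rw [if_pos h3, if_neg hc, aloop]
    have hR : (PySem.List.pyRange 0 (b.toList.length : Int) 1) = PySem.List.pyRange 0 18 1 := by
      rw [hlen]; norm_num
    -- count of whites as a countP over the range
    have hcnt : PySem.Str.count b "W"
        = (PySem.List.pyRange 0 18 1).countP (fun i => decide (PySem.List.pyGetD b.toList i ' ' = 'W')) := by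
      have hmap := PySem.List.map_pyGetD_pyRange_zero b.toList ' '
      have hlen' : PySem.List.len b.toList = 18 := by simp [PySem.List.len, hlen]
      rw [hlen'] at hmap
      calc PySem.Str.count b "W" = b.toList.count 'W' := by
              simpa using countW b.toList
        _ = b.toList.countP (· == 'W') := rfl
        _ = ((PySem.List.pyRange 0 18 1).map (fun j => PySem.List.pyGetD b.toList j ' ')).countP (· == 'W') := by
              rw [hmap]
        _ = _ := by
              rw [List.countP_map]
              apply List.countP_congr
              intro x _
              simp
    -- A's count is the whites with no empty edge-neighbour
    have hA : (PySem.List.pyRange 0 18 1).countP (aok b.toList)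
        = (PySem.List.pyRange 0 18 1).countP
            (fun i => decide (PySem.List.pyGetD b.toList i ' ' = 'W') && !edgeX b.toList i) := by
      apply List.countP_congr
      intro x hx
      obtain ⟨hx0, hx18⟩ := PySem.List.mem_pyRange_one.mp hx
      have hkey := noX_iff_not_edgeX b.toList x hx0 hx18
      by_cases h2 : ((neighboursFn x).getD []).countP
          (fun j => decide (PySem.List.pyGetD b.toList j ' ' = 'x')) = 0
      · have hE := hkey.mp h2
        simp [aok, h2, hE]
      · have hE : edgeX b.toList x = true := by
          cases hEx : edgeX b.toList x
          · exact absurd (hkey.mpr hEx) h2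
          · rfl
        simp [aok, h2, hE]
    -- B's set has exactly the whites with an empty edge-neighbour
    have hBlen : (pvEdges.foldl (fun m uv =>
        let m1 := if PySem.List.pyGetD b.toList uv.1 ' ' = 'x' ∧ PySem.List.pyGetD b.toList uv.2 ' ' = 'W'
                  then PySem.Set.add m uv.2 else m
        if PySem.List.pyGetD b.toList uv.2 ' ' = 'x' ∧ PySem.List.pyGetD b.toList uv.1 ' ' = 'W'
        then PySem.Set.add m1 uv.1 else m1) PySem.Set.empty).length
        = (PySem.List.pyRange 0 18 1).countP (mobp b.toList) := by
      rw [List.countP_eq_length_filter]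
      apply List.Perm.length_eq
      apply (List.perm_ext_iff_of_nodup (mob_nodup b.toList pvEdges [] List.nodup_nil)
        (List.Nodup.filter _ (by decide))).mpr
      intro y
      rw [List.mem_filter, mob_mem]
      simp only [List.not_mem_nil, false_or]
      constructor
      · rintro ⟨uv, huv, hcase⟩
        rcases hcase with ⟨h1, h2, rfl⟩ | ⟨h1, h2, rfl⟩
        · obtain ⟨_, hv0, hv18⟩ := edges_range uv huv
          refine ⟨PySem.List.mem_pyRange_one.mpr ⟨hv0, hv18⟩, ?_⟩
          unfold mobp edgeX
          simp only [Bool.and_eq_true, decide_eq_true_eq, List.any_eq_true]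
          exact ⟨h2, uv, huv, by simp [h1]⟩
        · obtain ⟨⟨hu0, hu18⟩, _⟩ := edges_range uv huv
          refine ⟨PySem.List.mem_pyRange_one.mpr ⟨hu0, hu18⟩, ?_⟩
          unfold mobp edgeX
          simp only [Bool.and_eq_true, decide_eq_true_eq, List.any_eq_true]
          exact ⟨h2, uv, huv, by simp [h1]⟩
      · rintro ⟨_, hm⟩
        unfold mobp edgeX at hm
        simp only [Bool.and_eq_true, decide_eq_true_eq, List.any_eq_true, Bool.or_eq_true] at hm
        obtain ⟨hw, uv, huv, hor⟩ := hm
        rcases hor with ⟨hy, hx⟩ | ⟨hy, hx⟩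
        · exact ⟨uv, huv, Or.inl ⟨hx, by rwa [hy] at hw, hy⟩⟩
        · exact ⟨uv, huv, Or.inr ⟨hx, by rwa [hy] at hw, hy⟩⟩
    rw [hR]
    simp only [PySem.Set.len] at *
    rw [hBlen, hA, hcnt,
      countP_split (PySem.List.pyRange 0 18 1)
        (fun i => decide (PySem.List.pyGetD b.toList i ' ' = 'W')) (edgeX b.toList)]
    unfold mobp
    push_cast
    ring
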